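-- pv_equiv track=rewrite | github.com/David-S-Hunsicker/learningpython | Search/capacity_to_ship_packages.py | can_fill
-- ===== SOURCE A (Python) =====
-- def can_fill(weights, days, capacity):
--     day = 1
--     load = 0
--     for weight in range(1, weights + 1):
--         if load + weight <= capacity:
--             load += weight
--         else:
--             day += 1
--             load = weight
--         if day > days: return False
--     return True
-- ===== SOURCE B (Python) =====
-- from math import isqrt
--
-- def can_fill(weights, days, capacity):
--     # Per-day closed form: each day's last package index is found directly from
--     # the triangular-number quadratic formula; the loop runs once per day, not per package.
--     if weights <= 0:
--         return True
--     # day 1 may stay empty if even package 1 does not fit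
--     e = (isqrt(8 * capacity + 1) - 1) // 2 if capacity >= 0 else 0
--     used = 1
--     s = e + 1
--     while s <= weights:
--         used += 1
--         if used > days:
--             return False
--         c = capacity + s * (s - 1) // 2
--         e = (isqrt(8 * c + 1) - 1) // 2 if c >= 0 else s
--         if e < s:
--             e = s  # first package of a day is always placed
--         s = e + 1
--     return used <= days
-- ===== Notes on version B (the rewrite author's own statement) =====
-- stated objective: alternative
-- what changed: Instead of simulating every package 1..weights one by one, B computes each day's last package index directly from the triangular-number quadratic formula (isqrt) and iterates once per day rather than once per package.
import Mathlib
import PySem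

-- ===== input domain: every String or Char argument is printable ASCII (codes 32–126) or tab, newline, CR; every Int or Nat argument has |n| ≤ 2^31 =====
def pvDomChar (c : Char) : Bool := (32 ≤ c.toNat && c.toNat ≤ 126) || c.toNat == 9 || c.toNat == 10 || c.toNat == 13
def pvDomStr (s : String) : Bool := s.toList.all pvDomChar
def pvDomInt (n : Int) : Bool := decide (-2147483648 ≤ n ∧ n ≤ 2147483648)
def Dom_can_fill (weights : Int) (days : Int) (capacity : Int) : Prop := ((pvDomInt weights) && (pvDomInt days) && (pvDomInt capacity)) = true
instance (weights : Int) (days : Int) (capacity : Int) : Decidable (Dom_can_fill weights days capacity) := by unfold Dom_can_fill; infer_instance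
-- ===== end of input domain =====

-- B replaces A's per-package simulation by a per-day closed form (the triangular-number
-- quadratic formula via integer sqrt), iterating once per day instead of once per package
-- (objective: alternative algorithm; not measured faster).

-- ===== PORT A =====
-- A's for-loop over the (lazy) range(1, weights+1) with its early 'return False';
-- w is the loop variable, (day, load) the mutable state
def can_fill_go (weights days capacity : Int) (w day load : Int) : Bool :=
  if _h : w ≤ weights then
    let p := if load + w ≤ capacity then (day, load + w) else (day + 1, w)
    if p.1 > days then false
    else can_fill_go weights days capacity (w + 1) p.1 p.2
  else true
termination_by (weights + 1 - w).toNat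
decreasing_by omega

def can_fill (weights : Int) (days : Int) (capacity : Int) : Bool :=
  can_fill_go weights days capacity 1 1 0

-- ===== PORT B =====
-- (isqrt(8*c+1) - 1) // 2 of Source B; math.isqrt on a nonnegative int = Nat.sqrt
def pvLastFit (c : Int) : Int :=
  PySem.Int.floordiv ((Nat.sqrt (8 * c + 1).toNat : Nat) - 1 : Int) 2

-- the while-loop of Source B: s = next unplaced package, used = days used so far
def can_fill_loop (weights days capacity : Int) (s used : Int) : Bool :=
  if _h : s ≤ weights then
    if used + 1 > days then false
    else
      let c := capacity + PySem.Int.floordiv (s * (s - 1)) 2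
      let e0 := if 0 ≤ c then pvLastFit c else s
      let e := if e0 < s then s else e0
      can_fill_loop weights days capacity (e + 1) (used + 1)
  else decide (used ≤ days)
termination_by (weights + 1 - s).toNat
decreasing_by
  split_ifs <;> omega

def can_fill_alt (weights : Int) (days : Int) (capacity : Int) : Bool :=
  if weights ≤ 0 then true
  else
    let e := if 0 ≤ capacity then pvLastFit capacity else 0
    can_fill_loop weights days capacity (e + 1) 1

-- ===== PRECONDITION & SPEC =====
def Spec_can_fill (weights : Int) (days : Int) (capacity : Int) (out : Bool) : Prop := out = can_fill_alt weights days capacity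
instance (weights : Int) (days : Int) (capacity : Int) (out : Bool) : Decidable (Spec_can_fill weights days capacity out) := by unfold Spec_can_fill; infer_instance

-- ===== CLAIM (what is proved, stated in full; the proofs are below) =====
def Claim_equal_can_fill : Prop := ∀ (weights : Int) (days : Int) (capacity : Int), Dom_can_fill weights days capacity → Spec_can_fill weights days capacity (can_fill weights days capacity)

-- ===== LEMMAS AND PROOFS =====

theorem prod_mono (a b : Int) (ha : 0 ≤ a) (hab : a ≤ b) : a * (a + 1) ≤ b * (b + 1) := by
  nlinarith

-- pvLastFit c is the largest e with e*(e+1)/2 ≤ c (stated doubled, division-free)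
theorem pvLastFit_spec (c : Int) (hc : 0 ≤ c) :
    0 ≤ pvLastFit c ∧ pvLastFit c * (pvLastFit c + 1) ≤ 2 * c ∧
      2 * c < (pvLastFit c + 1) * (pvLastFit c + 2) := by
  unfold pvLastFit
  set n : Nat := (8 * c + 1).toNat with hn
  have hni : (n : Int) = 8 * c + 1 := Int.toNat_of_nonneg (by omega)
  set r : Nat := Nat.sqrt n with hr
  have h1 : r * r ≤ n := by have := Nat.sqrt_le' n; simpa [pow_two] using this
  have h2 : n < (r + 1) * (r + 1) := by
    have := Nat.lt_succ_sqrt' n; simpa [Nat.succ_eq_add_one, pow_two] using this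
  have hr1 : 1 ≤ r := by
    rcases Nat.eq_zero_or_pos r with h | h
    · rw [h] at h2; omega
    · exact h
  rw [PySem.Int.floordiv_eq_ediv_of_pos (by norm_num)]
  set e : Int := ((r : Nat) - 1 : Int) / 2 with he
  have hb : 2 * e ≤ (r : Int) - 1 ∧ (r : Int) - 1 < 2 * e + 2 := by
    constructor
    · have := Int.ediv_mul_le ((r : Int) - 1) (by norm_num : (2:Int) ≠ 0)
      omega
    · have := Int.lt_ediv_add_one_mul_self ((r : Int) - 1) (by norm_num : (0:Int) < 2)
      omega
  have h1' : (r : Int) * r ≤ 8 * c + 1 := by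
    have : ((r : Nat) : Int) * r ≤ (n : Int) := by exact_mod_cast h1
    omega
  have h2' : 8 * c + 1 < ((r : Int) + 1) * ((r : Int) + 1) := by
    have : (n : Int) < ((r : Int) + 1) * ((r : Int) + 1) := by exact_mod_cast h2
    omega
  have hri : (1 : Int) ≤ r := by exact_mod_cast hr1
  refine ⟨by omega, ?_, ?_⟩
  · nlinarith [hb.1, hb.2, h1', hri]
  · nlinarith [hb.1, hb.2, h2', hri]

-- s*(s-1) is even, so Source B's '// 2' there is exact
theorem half_mul_pred (s : Int) : 2 * PySem.Int.floordiv (s * (s - 1)) 2 = s * (s - 1) := by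
  rw [PySem.Int.floordiv_eq_ediv_of_pos (by norm_num)]
  refine Int.mul_ediv_cancel' ?_
  rcases Int.even_or_odd s with h | h
  · exact Dvd.dvd.mul_right h.two_dvd _
  · have : Even (s - 1) := by simpa using h.sub_odd odd_one
    exact Dvd.dvd.mul_left this.two_dvd _

-- A's loop across one day's worth of consecutive fitting packages t..e
theorem chunkA (weights days capacity day : Int) (hday : day ≤ days) :
    ∀ (n : Nat) (t e load : Int), (e + 1 - t).toNat = n → 1 ≤ t → t ≤ e + 1 → e ≤ weights →
    (t ≤ e → 2 * load + e * (e + 1) - (t - 1) * t ≤ 2 * capacity) →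
    ∃ load', can_fill_go weights days capacity t day load
        = can_fill_go weights days capacity (e + 1) day load'
      ∧ 2 * load' = 2 * load + e * (e + 1) - (t - 1) * t := by
  intro n
  induction n with
  | zero =>
    intro t e load hn ht hte hew hfit
    have hte' : t = e + 1 := by omega
    subst hte'
    exact ⟨load, rfl, by ring⟩
  | succ k ih =>
    intro t e load hn ht hte hew hfit
    have htl : t ≤ e := by omega
    have hfit' := hfit htl
    have hmono : t * (t + 1) ≤ e * (e + 1) := by nlinarith
    have hid : t * (t + 1) = (t - 1) * t + 2 * t := by ring
    have hstep : load + t ≤ capacity := by linarith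
    obtain ⟨load', h1, h2⟩ := ih (t + 1) e (load + t) (by omega) (by omega) (by omega) hew
      (fun _ => by linarith)
    refine ⟨load', ?_, by linarith⟩
    rw [can_fill_go, dif_pos (by omega : t ≤ weights)]
    simp only [if_pos hstep]
    rw [if_neg (by omega : ¬ day > days)]
    exact h1

-- A's loop from a day boundary (the pending overflow package is s) equals B's loop
theorem mainA (weights days capacity : Int) :
    ∀ (n : Nat) (s used load : Int), (weights + 1 - s).toNat = n → 1 ≤ s → 0 ≤ load →
    capacity < load + s → (s ≤ weights ∨ used ≤ days) →
    can_fill_go weights days capacity s used load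
      = can_fill_loop weights days capacity s used := by
  intro n
  induction n using Nat.strong_induction_on with
  | _ n ih =>
  intro s used load hn hs hload hcap hdisj
  by_cases hsw : s ≤ weights
  case neg =>
    rw [can_fill_go, dif_neg hsw]
    rw [can_fill_loop, dif_neg hsw]
    have hud : used ≤ days := hdisj.resolve_left hsw
    simp [hud]
  case pos =>
    rw [can_fill_go, dif_pos hsw]
    simp only [if_neg (show ¬ load + s ≤ capacity from by omega)]
    by_cases hd : used + 1 > days
    · rw [if_pos hd]
      rw [can_fill_loop, dif_pos hsw, if_pos hd]
    · rw [if_neg hd]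
      have hrhs : can_fill_loop weights days capacity s used
          = can_fill_loop weights days capacity
              ((if (if 0 ≤ capacity + PySem.Int.floordiv (s * (s - 1)) 2 then
                      pvLastFit (capacity + PySem.Int.floordiv (s * (s - 1)) 2) else s) < s then s
                else (if 0 ≤ capacity + PySem.Int.floordiv (s * (s - 1)) 2 then
                      pvLastFit (capacity + PySem.Int.floordiv (s * (s - 1)) 2) else s)) + 1)
              (used + 1) := by
        conv_lhs => rw [can_fill_loop]
        rw [dif_pos hsw, if_neg hd]
      set c : Int := capacity + PySem.Int.floordiv (s * (s - 1)) 2 with hcdef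
      set e0 : Int := if 0 ≤ c then pvLastFit c else s with he0def
      set E : Int := if e0 < s then s else e0 with hEdef
      have h2c : 2 * c = 2 * capacity + s * (s - 1) := by
        rw [hcdef]; have := half_mul_pred s; linarith
      have hsE : s ≤ E := by rw [hEdef]; split <;> omega
      have hfitE : s + 1 ≤ E → 2 * s + E * (E + 1) - s * (s + 1) ≤ 2 * capacity := by
        intro hE1
        by_cases h0 : 0 ≤ c
        · have hsp := pvLastFit_spec c h0
          have he0E : E = e0 := by rw [hEdef]; split <;> omega
          rw [he0def] at he0E; rw [if_pos h0] at he0E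
          have : E * (E + 1) ≤ 2 * c := by rw [he0E]; exact hsp.2.1
          have hid : s * (s + 1) = s * (s - 1) + 2 * s := by ring
          linarith
        · exfalso
          have hes : e0 = s := by rw [he0def, if_neg h0]
          have hEs : E = s := by rw [hEdef, hes]; simp
          omega
      have hnextD : 2 * capacity < 2 * s + E * (E + 1) - s * (s + 1) + 2 * (E + 1) := by
        have hid : s * (s + 1) = s * (s - 1) + 2 * s := by ring
        by_cases h0 : 0 ≤ c
        · have hsp := pvLastFit_spec c h0
          have he0v : e0 = pvLastFit c := by rw [he0def, if_pos h0]
          by_cases hE0 : e0 < s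
          · have hEs : E = s := by rw [hEdef, if_pos hE0]
            have hmono : (e0 + 1) * (e0 + 2) ≤ s * (s + 1) := by
              have := prod_mono (e0 + 1) s (by rw [he0v]; linarith [(pvLastFit_spec c h0).1]) (by omega)
              linarith
            have h2cb : 2 * c < (e0 + 1) * (e0 + 2) := by rw [he0v]; exact hsp.2.2
            rw [hEs]
            nlinarith
          · have hEs : E = e0 := by rw [hEdef, if_neg hE0]
            have h2cb : 2 * c < (e0 + 1) * (e0 + 2) := by rw [he0v]; exact hsp.2.2
            have hexp : (e0 + 1) * (e0 + 2) = e0 * (e0 + 1) + 2 * (e0 + 1) := by ring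
            rw [hEs]
            linarith
        · have hEs : E = s := by
            have : e0 = s := by rw [he0def, if_neg h0]
            rw [hEdef, this]; simp
          have hc0 : 2 * c < 0 := by omega
          have hpos : 0 ≤ (s + 1) * (s + 2) := by nlinarith
          have hexp : (s + 1) * (s + 2) = s * (s + 1) + 2 * (s + 1) := by ring
          rw [hEs]
          nlinarith
      rw [hrhs]
      by_cases hEw : E < weights
      · obtain ⟨L, hL, hL2⟩ := chunkA weights days capacity (used + 1) (by omega)
          (E + 1 - (s + 1)).toNat (s + 1) E s rfl (by omega) (by omega) (by omega)
          (fun h => by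
            have := hfitE (by omega)
            linarith [show (s + 1 - 1) * (s + 1) = s * (s + 1) from by ring])
        rw [hL]
        have hmonoSE : s * (s + 1) ≤ E * (E + 1) := prod_mono s E (by omega) hsE
        exact ih (weights + 1 - (E + 1)).toNat (by omega) (E + 1) (used + 1) L rfl (by omega)
          (by linarith) (by linarith) (Or.inl (by omega))
      · obtain ⟨L, hL, hL2⟩ := chunkA weights days capacity (used + 1) (by omega)
          (weights + 1 - (s + 1)).toNat (s + 1) weights s rfl (by omega) (by omega) (le_refl _)
          (fun h => by
            have h1 := hfitE (by omega)
            have hmonoWE : weights * (weights + 1) ≤ E * (E + 1) := prod_mono weights E (by omega) (by omega)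
            have : (s + 1 - 1) * (s + 1) = s * (s + 1) := by ring
            linarith)
        rw [hL]
        rw [can_fill_go, dif_neg (by omega : ¬ weights + 1 ≤ weights)]
        rw [can_fill_loop, dif_neg (by omega)]
        simp [show used + 1 ≤ days from by omega]

-- ===== VERDICT (by name: the statement is the Claim_ definition above) =====
theorem can_fill_spec : Claim_equal_can_fill := by
  intro weights days capacity _
  unfold Spec_can_fill
  by_cases hw : weights ≤ 0
  · unfold can_fill can_fill_alt
    rw [can_fill_go, dif_neg (by omega : ¬ (1:Int) ≤ weights), if_pos hw]
  · have hw1 : 1 ≤ weights := by omega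
    by_cases hdy : days < 1
    · -- weights ≥ 1 and days < 1: both programs answer false
      have hA : can_fill weights days capacity = false := by
        unfold can_fill
        rw [can_fill_go, dif_pos hw1]
        have hpt : ∀ (p : Int × Int), p.1 > days →
            (if p.1 > days then false
             else can_fill_go weights days capacity (1 + 1) p.1 p.2) = false :=
          fun p hp => if_pos hp
        split_ifs with h1
        · exact hpt ((1:Int), (0:Int) + 1) (show (1:Int) > days by omega)
        · exact hpt ((1:Int) + 1, (1:Int)) (show (1:Int) + 1 > days by omega)
      have hB : can_fill_alt weights days capacity = false := by
        unfold can_fill_alt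
        rw [if_neg hw]
        rw [can_fill_loop]
        split <;>
          · split
            · exact if_pos (by omega)
            · simp only [decide_eq_false_iff_not]
              omega
      rw [hA, hB]
    · replace hdy : 1 ≤ days := by omega
      by_cases hc0 : 0 ≤ capacity
      · set e1 : Int := pvLastFit capacity with he1
        have hsp := pvLastFit_spec capacity hc0
        have hBdef : can_fill_alt weights days capacity
            = can_fill_loop weights days capacity (e1 + 1) 1 := by
          unfold can_fill_alt
          rw [if_neg hw, if_pos hc0]
        by_cases hEw : e1 < weights
        · obtain ⟨L, hL, hL2⟩ := chunkA weights days capacity 1 hdy (e1 + 1 - 1).toNat 1 e1 0 rfl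
            (le_refl _) (by omega) (by omega)
            (fun h => by
              have := hsp.2.1
              linarith [show ((1:Int) - 1) * 1 = 0 from by ring])
          unfold can_fill
          rw [hL, hBdef]
          have hL2' : 2 * L = e1 * (e1 + 1) := by linarith [show ((1:Int) - 1) * 1 = 0 from by ring]
          have hLpos : 0 ≤ L := by nlinarith [hsp.1]
          have hexp : (e1 + 1) * (e1 + 2) = e1 * (e1 + 1) + 2 * (e1 + 1) := by ring
          exact mainA weights days capacity (weights + 1 - (e1 + 1)).toNat (e1 + 1) 1 L rfl
            (by omega) hLpos (by linarith [hsp.2.2]) (Or.inl (by omega))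
        · obtain ⟨L, hL, hL2⟩ := chunkA weights days capacity 1 hdy (weights + 1 - 1).toNat 1 weights 0 rfl
            (le_refl _) (by omega) (le_refl _)
            (fun h => by
              have hmono : weights * (weights + 1) ≤ e1 * (e1 + 1) := prod_mono weights e1 (by omega) (by omega)
              have := hsp.2.1
              linarith [show ((1:Int) - 1) * 1 = 0 from by ring])
          unfold can_fill
          rw [hL, hBdef]
          rw [can_fill_go, dif_neg (by omega : ¬ weights + 1 ≤ weights)]
          rw [can_fill_loop, dif_neg (by omega)]
          simp [show (1:Int) ≤ days from hdy]
      · have hBdef : can_fill_alt weights days capacity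
            = can_fill_loop weights days capacity (0 + 1) 1 := by
          unfold can_fill_alt
          rw [if_neg hw, if_neg hc0]
        unfold can_fill
        rw [hBdef]
        exact mainA weights days capacity (weights + 1 - (0 + 1)).toNat (0 + 1) 1 0 rfl
          (by omega) (le_refl _) (by omega) (Or.inl (by omega))
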